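-- pv_equiv track=rewrite | github.com/Finding-new-code/CRM--CYNERZA | app/services/lead_import_service.py | suggest_mappings
-- ===== SOURCE A (Python) =====
-- from typing import List, Dict, Any, Tuple, Optional
--
-- COLUMN_MAPPINGS = {
--     "full_name": ["full_name", "fullname", "name", "full name", "contact name", "lead name"],
--     "email": ["email", "email address", "e-mail", "mail"],
--     "phone": ["phone", "phone number", "telephone", "mobile", "cell", "contact number"],
--     "source": ["source", "lead source", "origin", "channel"]
-- }
--
-- def suggest_mappings(columns: List[str]) -> Dict[str, str]:
--     """
--     Suggest column to CRM field mappings based on column names.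
--
--     Args:
--         columns: List of detected column names
--
--     Returns:
--         Dict mapping column names to suggested CRM fields
--     """
--     suggestions = {}
--
--     for column in columns:
--         col_lower = column.lower().strip()
--
--         for crm_field, variations in COLUMN_MAPPINGS.items():
--             if col_lower in variations:
--                 suggestions[column] = crm_field
--                 break
--
--     return suggestions
-- ===== SOURCE B (Python) =====
-- from typing import List, Dict
--
-- COLUMN_MAPPINGS = {
--     "full_name": ["full_name", "fullname", "name", "full name", "contact name", "lead name"],
--     "email": ["email", "email address", "e-mail", "mail"],
--     "phone": ["phone", "phone number", "telephone", "mobile", "cell", "contact number"],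
--     "source": ["source", "lead source", "origin", "channel"]
-- }
--
-- # Reverse index built once: variation -> crm_field (first field wins).
-- _REVERSE_INDEX = {}
-- for _field, _variations in COLUMN_MAPPINGS.items():
--     for _v in _variations:
--         if _v not in _REVERSE_INDEX:
--             _REVERSE_INDEX[_v] = _field
--
-- def suggest_mappings(columns: List[str]) -> Dict[str, str]:
--     suggestions = {}
--     for column in columns:
--         field = _REVERSE_INDEX.get(column.lower().strip())
--         if field is not None:
--             suggestions[column] = field
--     return suggestions
-- ===== Notes on version B (the rewrite author's own statement) =====
-- stated objective: faster
-- what changed: Replaces the per-column nested scan over COLUMN_MAPPINGS' fields and variation lists with a reverse index dict built once at module load, so each column needs a single hash lookup instead of an inner scan.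
import Mathlib
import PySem

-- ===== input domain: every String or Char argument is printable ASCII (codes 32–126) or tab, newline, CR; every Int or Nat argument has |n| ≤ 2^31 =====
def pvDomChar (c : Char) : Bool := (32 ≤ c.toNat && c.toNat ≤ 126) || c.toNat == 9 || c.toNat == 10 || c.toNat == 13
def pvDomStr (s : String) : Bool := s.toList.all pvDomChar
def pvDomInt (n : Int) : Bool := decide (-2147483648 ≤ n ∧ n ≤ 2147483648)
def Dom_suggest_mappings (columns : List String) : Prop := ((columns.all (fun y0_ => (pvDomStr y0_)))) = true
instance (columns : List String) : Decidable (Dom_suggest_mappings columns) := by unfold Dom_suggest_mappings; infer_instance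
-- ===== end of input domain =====

-- B replaces A's per-column nested scan over COLUMN_MAPPINGS with a reverse index dict built once (faster: one lookup per column).

-- ===== PORT A =====
-- COLUMN_MAPPINGS as its items list (dict iteration order = insertion order)
def pvColumnMappings : List (String × List String) :=
  [("full_name", ["full_name", "fullname", "name", "full name", "contact name", "lead name"]),
   ("email", ["email", "email address", "e-mail", "mail"]),
   ("phone", ["phone", "phone number", "telephone", "mobile", "cell", "contact number"]),
   ("source", ["source", "lead source", "origin", "channel"])]

-- A's inner 'for crm_field, variations in COLUMN_MAPPINGS.items(): if col_lower in variations: …; break'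
def pvInnerScan (col_lower : String) : List (String × List String) → Option String
  | [] => none
  | (crm_field, variations) :: rest =>
      if variations.contains col_lower then some crm_field else pvInnerScan col_lower rest

def suggest_mappings (columns : List String) : List (String × String) :=
  (columns.foldl (fun (suggestions : PySem.Dict String String) column =>
      let col_lower := PySem.Str.strip (PySem.Str.lower column)
      match pvInnerScan col_lower pvColumnMappings with
      | some crm_field => suggestions.insert column crm_field
      | none => suggestions) PySem.Dict.empty).items

-- ===== PORT B =====
-- module-level '_REVERSE_INDEX' built once: for each field, for each variation, insert if absent
def pvReverseIndex : PySem.Dict String String :=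
  pvColumnMappings.foldl (fun d fv =>
    fv.2.foldl (fun d v => if d.contains v then d else d.insert v fv.1) d) PySem.Dict.empty

def suggest_mappings_alt (columns : List String) : List (String × String) :=
  (columns.foldl (fun (suggestions : PySem.Dict String String) column =>
      match pvReverseIndex.get? (PySem.Str.strip (PySem.Str.lower column)) with
      | some field => suggestions.insert column field
      | none => suggestions) PySem.Dict.empty).items

-- ===== PRECONDITION & SPEC =====
def Spec_suggest_mappings (columns : List String) (out : List (String × String)) : Prop := out = suggest_mappings_alt columns
instance (columns : List String) (out : List (String × String)) : Decidable (Spec_suggest_mappings columns out) := by unfold Spec_suggest_mappings; infer_instance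

-- ===== CLAIM (what is proved, stated in full; the proofs are below) =====
def Claim_equal_suggest_mappings : Prop := ∀ (columns : List String), Dom_suggest_mappings columns → Spec_suggest_mappings columns (suggest_mappings columns)

-- ===== LEMMAS AND PROOFS =====

-- flatten a mapping list into an association list (variation, field)
def pvFlat (m : List (String × List String)) : List (String × String) :=
  m.flatMap (fun fv => fv.2.map (fun v => (v, fv.1)))

theorem pvChain (s f : String) (vs : List String) (tail : List (String × String)) :
    (if vs.contains s then some f
     else (PySem.Dict.mk tail).get? s)
      = (PySem.Dict.mk (vs.map (fun v => (v, f)) ++ tail)).get? s := by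
  induction vs with
  | nil => simp
  | cons v vs ih =>
      simp only [List.contains_cons, List.map_cons, List.cons_append, PySem.Dict.get?_mk_cons,
        Bool.beq_comm (a := s) (b := v)]
      cases h : (v == s) with
      | true => simp
      | false =>
          simp only [Bool.false_or, Bool.false_eq_true, if_false]
          exact ih

theorem pvScan_eq_flat (m : List (String × List String)) (s : String) :
    pvInnerScan s m = (PySem.Dict.mk (pvFlat m)).get? s := by
  induction m with
  | nil => simp [pvInnerScan, pvFlat, PySem.Dict.get?]
  | cons fv rest ih =>
      obtain ⟨f, vs⟩ := fv
      simp only [pvInnerScan, pvFlat, List.flatMap_cons, ih]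
      exact pvChain s f vs _

set_option maxHeartbeats 1000000 in
theorem pvRev_eq_flat : pvReverseIndex = PySem.Dict.mk (pvFlat pvColumnMappings) := by decide

theorem pvInner_eq_rev (s : String) :
    pvInnerScan s pvColumnMappings = pvReverseIndex.get? s := by
  rw [pvRev_eq_flat]; exact pvScan_eq_flat _ s

theorem pvFoldl_ext {α β : Type} (f g : β → α → β) (h : ∀ b a, f b a = g b a)
    (l : List α) (b : β) : l.foldl f b = l.foldl g b := by
  induction l generalizing b with
  | nil => rfl
  | cons x xs ih => simp only [List.foldl_cons, h]; exact ih _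

-- ===== VERDICT (by name: the statement is the Claim_ definition above) =====
theorem suggest_mappings_spec : Claim_equal_suggest_mappings := by
  intro columns _
  unfold Spec_suggest_mappings suggest_mappings suggest_mappings_alt
  exact congrArg PySem.Dict.items
    (pvFoldl_ext _ _ (fun d column => by simp only [pvInner_eq_rev]) columns PySem.Dict.empty)
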